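-- pv_equiv track=rewrite | github.com/irtaza780/technical_debt_findings | refactored_code/DetectPalindromes_DefaultOrganization_20250911160644/palindrome_detector.py | _iter_words
-- ===== SOURCE A (Python) =====
-- from typing import List, Iterator, Tuple
--
-- def _iter_words(line: str) -> Iterator[Tuple[int, int]]:
--     """
--     Yield (start, end) spans for words within a line.
--
--     Words are contiguous alphanumeric sequences (Unicode-aware).
--
--     Args:
--         line: Line of text to process
--
--     Yields:
--         Tuples of (start_index, end_index) for each word
--     """
--     n = len(line)
--     i = 0
--     while i < n:
--         # Skip non-alphanumeric characters
--         while i < n and not line[i].isalnum():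
--             i += 1
--         if i >= n:
--             break
--         start = i
--         # Consume contiguous alphanumeric characters
--         while i < n and line[i].isalnum():
--             i += 1
--         yield start, i
-- ===== SOURCE B (Python) =====
-- def _iter_words(line):
--     """Yield (start, end) word spans by boundary detection in staged passes:
--     precompute per-char alnum flags, list word-start positions and word-end
--     positions separately, and zip them into spans."""
--     n = len(line)
--     alnum = [c.isalnum() for c in line]
--     starts = [i for i in range(n) if alnum[i] and (i == 0 or not alnum[i - 1])]
--     ends = [i for i in range(1, n + 1) if alnum[i - 1] and (i == n or not alnum[i])]
--     return iter(zip(starts, ends))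
-- ===== Notes on version B (the rewrite author's own statement) =====
-- stated objective: alternative
-- what changed: Replaced A's nested skip/consume index machine by staged passes: precompute per-char alnum flags, detect word-start and word-end boundary positions with two comprehensions (a position where the flag flips on/off), and zip the two lists into spans.
import Mathlib
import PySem

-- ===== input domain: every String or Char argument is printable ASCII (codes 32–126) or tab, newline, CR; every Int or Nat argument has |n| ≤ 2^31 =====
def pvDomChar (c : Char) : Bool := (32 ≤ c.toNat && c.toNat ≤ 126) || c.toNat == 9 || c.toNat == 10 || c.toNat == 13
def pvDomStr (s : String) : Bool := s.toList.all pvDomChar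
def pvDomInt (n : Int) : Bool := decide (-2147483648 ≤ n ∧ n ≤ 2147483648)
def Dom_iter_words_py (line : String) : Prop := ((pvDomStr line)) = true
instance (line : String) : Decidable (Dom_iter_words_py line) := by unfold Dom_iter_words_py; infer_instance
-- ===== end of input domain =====

-- B replaces A's nested skip/consume index machine by staged passes: precompute per-char
-- alnum flags, list word-start and word-end boundary positions, zip them (objective: alternative).

-- ===== PORT A =====
-- inner `while i < n and not line[i].isalnum(): i += 1`
def pvSkip (l : List Char) (n i : Nat) : Nat :=
  if h : i < n ∧ PySem.Chars.isalnum (l.getD i ' ') = false then pvSkip l n (i + 1) else i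
termination_by n - i
decreasing_by omega

-- inner `while i < n and line[i].isalnum(): i += 1`
def pvConsume (l : List Char) (n i : Nat) : Nat :=
  if h : i < n ∧ PySem.Chars.isalnum (l.getD i ' ') = true then pvConsume l n (i + 1) else i
termination_by n - i
decreasing_by omega

-- termination facts for the outer while-loop (cited by `decreasing_by` below)
theorem pvSkip_ge (l : List Char) (n i : Nat) : i ≤ pvSkip l n i := by
  fun_induction pvSkip l n i with
  | case1 i h ih => omega
  | case2 i h => omega

theorem pvSkip_stop (l : List Char) (n i : Nat) (h : pvSkip l n i < n) :
    PySem.Chars.isalnum (l.getD (pvSkip l n i) ' ') = true := by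
  fun_induction pvSkip l n i with
  | case1 i h' ih => exact ih h
  | case2 i h' =>
    by_cases hb : PySem.Chars.isalnum (l.getD i ' ') = true
    · exact hb
    · exact absurd ⟨h, by simpa using hb⟩ h'

theorem pvConsume_ge (l : List Char) (n i : Nat) : i ≤ pvConsume l n i := by
  fun_induction pvConsume l n i with
  | case1 i h ih => omega
  | case2 i h => omega

theorem pvConsume_gt (l : List Char) (n i : Nat) (h : i < n)
    (ha : PySem.Chars.isalnum (l.getD i ' ') = true) : i < pvConsume l n i := by
  rw [pvConsume, dif_pos ⟨h, ha⟩]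
  have := pvConsume_ge l n (i + 1)
  omega

-- outer `while i < n: … yield start, i`
def pvOuter (l : List Char) (n i : Nat) : List (Int × Int) :=
  let j := pvSkip l n i
  if _hj : n ≤ j then []
  else
    let k := pvConsume l n j
    ((j : Int), (k : Int)) :: pvOuter l n k
termination_by n - i
decreasing_by
  have h1 := pvSkip_ge l n i
  have h2 := pvSkip_stop l n i (by omega)
  have h3 := pvConsume_gt l n (pvSkip l n i) (by omega) h2
  omega

def iter_words_py (line : String) : List (Int × Int) :=
  pvOuter line.toList line.toList.length 0

-- ===== PORT B =====
-- `alnum = [c.isalnum() for c in line]`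
def pvAln (line : List Char) : List Bool := line.map PySem.Chars.isalnum

-- comprehension condition for `starts`
def pvStartAt (a : List Bool) (i : Nat) : Bool :=
  a.getD i false && (decide (i = 0) || !(a.getD (i - 1) false))

-- comprehension condition for `ends`
def pvEndAt (a : List Bool) (i : Nat) : Bool :=
  a.getD (i - 1) false && (decide (i = a.length) || !(a.getD i false))

def iter_words_py_alt (line : String) : List (Int × Int) :=
  let a := pvAln line.toList
  let starts := (List.range a.length).filter (pvStartAt a)
  let ends := (List.range' 1 a.length).filter (pvEndAt a)
  (starts.zip ends).map (fun p => ((p.1 : Int), (p.2 : Int)))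

-- ===== PRECONDITION & SPEC =====
def Spec_iter_words_py (line : String) (out : List (Int × Int)) : Prop := out = iter_words_py_alt line
instance (line : String) (out : List (Int × Int)) : Decidable (Spec_iter_words_py line out) := by unfold Spec_iter_words_py; infer_instance

-- ===== CLAIM (what is proved, stated in full; the proofs are below) =====
def Claim_equal_iter_words_py : Prop := ∀ (line : String), Dom_iter_words_py line → Spec_iter_words_py line (iter_words_py line)

-- ===== LEMMAS AND PROOFS =====
-- The skip loop lands at i plus the length of the non-alnum run starting at i.
theorem pvSkip_char (l : List Char) (i : Nat) :
    pvSkip l l.length i = i + ((l.drop i).takeWhile (fun c => !PySem.Chars.isalnum c)).length := by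
  fun_induction pvSkip l l.length i with
  | case1 i h ih =>
    obtain ⟨h1, h2⟩ := h
    rw [List.drop_eq_getElem_cons h1, List.takeWhile_cons]
    simp only [List.getD_eq_getElem l ' ' h1] at h2
    simp [h2, ih]
    omega
  | case2 i h =>
    by_cases h1 : i < l.length
    · have h2 : PySem.Chars.isalnum (l.getD i ' ') = true := by
        by_cases hb : PySem.Chars.isalnum (l.getD i ' ') = true
        · exact hb
        · exact absurd ⟨h1, by simpa using hb⟩ h
      rw [List.drop_eq_getElem_cons h1, List.takeWhile_cons]
      simp only [List.getD_eq_getElem l ' ' h1] at h2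
      simp [h2]
    · rw [List.drop_of_length_le (by omega)]
      simp

-- The consume loop lands at i plus the length of the alnum run starting at i.
theorem pvConsume_char (l : List Char) (i : Nat) :
    pvConsume l l.length i = i + ((l.drop i).takeWhile (fun c => PySem.Chars.isalnum c)).length := by
  fun_induction pvConsume l l.length i with
  | case1 i h ih =>
    obtain ⟨h1, h2⟩ := h
    rw [List.drop_eq_getElem_cons h1, List.takeWhile_cons]
    simp only [List.getD_eq_getElem l ' ' h1] at h2
    simp [h2, ih]
    omega
  | case2 i h =>
    by_cases h1 : i < l.length
    · have h2 : PySem.Chars.isalnum (l.getD i ' ') = false := by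
        by_cases hb : PySem.Chars.isalnum (l.getD i ' ') = true
        · exact absurd ⟨h1, hb⟩ h
        · simpa using hb
      rw [List.drop_eq_getElem_cons h1, List.takeWhile_cons]
      simp only [List.getD_eq_getElem l ' ' h1] at h2
      simp [h2]
    · rw [List.drop_of_length_le (by omega)]
      simp

-- Where the consume loop stops (strictly inside), the char is non-alnum.
theorem pvConsume_stop (l : List Char) (n i : Nat) (h : pvConsume l n i < n) :
    PySem.Chars.isalnum (l.getD (pvConsume l n i) ' ') = false := by
  fun_induction pvConsume l n i with
  | case1 i h' ih => exact ih h
  | case2 i h' =>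
    by_cases hb : PySem.Chars.isalnum (l.getD i ' ') = true
    · exact absurd ⟨h, hb⟩ h'
    · simpa using hb

theorem pvAln_length (l : List Char) : (pvAln l).length = l.length := by
  simp [pvAln]

theorem pvAln_getD_lt (l : List Char) (p : Nat) (h : p < l.length) :
    (pvAln l).getD p false = PySem.Chars.isalnum (l.getD p ' ') := by
  rw [List.getD_eq_getElem _ _ (by simpa [pvAln_length] using h), List.getD_eq_getElem _ _ h]
  simp [pvAln]

-- A position strictly inside a takeWhile-run satisfies the run predicate.
theorem pv_run (q : Char → Bool) (l : List Char) (i p : Nat) (hip : i ≤ p)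
    (h : p < i + ((l.drop i).takeWhile q).length) :
    p < l.length ∧ q (l.getD p ' ') = true := by
  have hpre : (l.drop i).takeWhile q <+: l.drop i := List.takeWhile_prefix q
  have hslen : ((l.drop i).takeWhile q).length ≤ (l.drop i).length := hpre.length_le
  have hln : p < l.length := by simp [List.length_drop] at hslen; omega
  have hk : p - i < ((l.drop i).takeWhile q).length := by omega
  have hk2 : p - i < (l.drop i).length := by omega
  have he : ((l.drop i).takeWhile q)[p - i]'hk = l[p]'hln := by
    rw [hpre.getElem hk, List.getElem_drop]
    congr 1; omega
  have hm : ((l.drop i).takeWhile q)[p - i]'hk ∈ (l.drop i).takeWhile q :=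
    List.getElem_mem hk
  have hq := List.mem_takeWhile_imp hm
  rw [he] at hq
  exact ⟨hln, by rw [List.getD_eq_getElem _ _ hln]; exact hq⟩

theorem pv_filter_none (f : Nat → Bool) (a m : Nat)
    (h : ∀ p, a ≤ p → p < a + m → f p = false) :
    (List.range' a m).filter f = [] := by
  rw [List.filter_eq_nil_iff]
  intro x hx
  rw [List.mem_range'_1] at hx
  simp [h x hx.1 hx.2]

theorem pv_range_split (a b c : Nat) (h1 : a ≤ b) (h2 : b ≤ c) :
    List.range' a (c - a) = List.range' a (b - a) ++ List.range' b (c - b) := by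
  rw [show c - a = (b - a) + (c - b) by omega, ← List.range'_append]
  congr 2
  omega

-- One round of the outer loop: with j the next word's start and k its end, the boundary
-- filters over [i, n) peel off exactly j and k.
theorem pv_step (l : List Char) (i j k : Nat)
    (hij : i ≤ j) (hjn : j < l.length) (hjk : j < k) (hkn : k ≤ l.length)
    (Hi : i = 0 ∨ PySem.Chars.isalnum (l.getD i ' ') = false)
    (R1 : ∀ p, i ≤ p → p < j → PySem.Chars.isalnum (l.getD p ' ') = false)
    (halj : PySem.Chars.isalnum (l.getD j ' ') = true)
    (R2 : ∀ p, j ≤ p → p < k → PySem.Chars.isalnum (l.getD p ' ') = true)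
    (hkstop : k = l.length ∨ PySem.Chars.isalnum (l.getD k ' ') = false) :
    ((List.range' i (l.length - i)).filter (pvStartAt (pvAln l)) =
      j :: (List.range' k (l.length - k)).filter (pvStartAt (pvAln l))) ∧
    ((List.range' (i + 1) (l.length - i)).filter (pvEndAt (pvAln l)) =
      k :: (List.range' (k + 1) (l.length - k)).filter (pvEndAt (pvAln l))) := by
  constructor
  · rw [pv_range_split i j l.length hij (by omega),
        pv_range_split j k l.length (by omega) hkn,
        List.filter_append, List.filter_append]
    have h1 : (List.range' i (j - i)).filter (pvStartAt (pvAln l)) = [] := by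
      apply pv_filter_none; intro p hp1 hp2
      unfold pvStartAt
      rw [pvAln_getD_lt l p (by omega), R1 p hp1 (by omega)]
      simp
    have hsj : pvStartAt (pvAln l) j = true := by
      unfold pvStartAt
      rw [pvAln_getD_lt l j hjn, halj]
      by_cases h0 : j = 0
      · simp [h0]
      · have hprev : PySem.Chars.isalnum (l.getD (j - 1) ' ') = false := by
          by_cases hij' : i ≤ j - 1
          · exact R1 (j - 1) hij' (by omega)
          · have hji : j = i := by omega
            rcases Hi with h | h
            · omega
            · rw [hji] at halj; rw [halj] at h; exact absurd h (by simp)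
        rw [pvAln_getD_lt l (j - 1) (by omega), hprev]
        simp
    have h3 : (List.range' (j + 1) (k - j - 1)).filter (pvStartAt (pvAln l)) = [] := by
      apply pv_filter_none; intro p hp1 hp2
      unfold pvStartAt
      have hprev : PySem.Chars.isalnum (l.getD (p - 1) ' ') = true := R2 (p - 1) (by omega) (by omega)
      rw [pvAln_getD_lt l (p - 1) (by omega), hprev]
      simp [show ¬ (p = 0) by omega]
    have h2 : (List.range' j (k - j)).filter (pvStartAt (pvAln l)) = [j] := by
      rw [show k - j = (k - j - 1) + 1 by omega, List.range'_succ, List.filter_cons,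
        if_pos hsj, h3]
    rw [h1, h2]
    simp
  · rw [show l.length - i = (l.length + 1) - (i + 1) by omega,
        pv_range_split (i + 1) k (l.length + 1) (by omega) (by omega),
        List.filter_append]
    have h1 : (List.range' (i + 1) (k - (i + 1))).filter (pvEndAt (pvAln l)) = [] := by
      apply pv_filter_none; intro e he1 he2
      unfold pvEndAt
      by_cases hej : e ≤ j
      · have hprev : PySem.Chars.isalnum (l.getD (e - 1) ' ') = false :=
          R1 (e - 1) (by omega) (by omega)
        rw [pvAln_getD_lt l (e - 1) (by omega), hprev]
        simp
      · have h4 : PySem.Chars.isalnum (l.getD e ' ') = true := R2 e (by omega) (by omega)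
        rw [pvAln_getD_lt l e (by omega), h4, pvAln_length]
        simp [show ¬ (e = l.length) by omega]
    have hek : pvEndAt (pvAln l) k = true := by
      unfold pvEndAt
      have hk1 : PySem.Chars.isalnum (l.getD (k - 1) ' ') = true := R2 (k - 1) (by omega) (by omega)
      rw [pvAln_getD_lt l (k - 1) (by omega), hk1, pvAln_length]
      by_cases hkn' : k = l.length
      · simp [hkn']
      · rcases hkstop with h | h
        · exact absurd h hkn'
        · rw [pvAln_getD_lt l k (by omega), h]
          simp
    have h2 : (List.range' k ((l.length + 1) - k)).filter (pvEndAt (pvAln l)) =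
        k :: (List.range' (k + 1) (l.length - k)).filter (pvEndAt (pvAln l)) := by
      rw [show (l.length + 1) - k = (l.length - k) + 1 by omega, List.range'_succ,
        List.filter_cons, if_pos hek]
    rw [h1, h2]
    simp

theorem pv_main (m : Nat) : ∀ (l : List Char) (i : Nat), i ≤ l.length → l.length - i ≤ m →
    (i = 0 ∨ i = l.length ∨ PySem.Chars.isalnum (l.getD i ' ') = false) →
    pvOuter l l.length i =
      (((List.range' i (l.length - i)).filter (pvStartAt (pvAln l))).zip
        ((List.range' (i + 1) (l.length - i)).filter (pvEndAt (pvAln l)))).map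
        (fun p => ((p.1 : Int), (p.2 : Int))) := by
  induction m with
  | zero =>
    intro l i hin hm Hi
    have hieq : i = l.length := by omega
    subst hieq
    rw [pvOuter]
    have hsk : pvSkip l l.length l.length = l.length := by rw [pvSkip]; simp
    simp [hsk]
  | succ m ih =>
    intro l i hin hm Hi
    have hj := pvSkip_char l i
    have hsle : ((l.drop i).takeWhile (fun c => !PySem.Chars.isalnum c)).length ≤ l.length - i := by
      have := (List.takeWhile_prefix (fun c => !PySem.Chars.isalnum c) (l := l.drop i)).length_le
      simpa [List.length_drop] using this
    by_cases hc : l.length ≤ pvSkip l l.length i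
    · -- no word remains: the whole tail [i, n) is non-alnum, both filters are empty
      rw [pvOuter]
      rw [dif_pos hc]
      rw [hj] at hc
      have hstarts : (List.range' i (l.length - i)).filter (pvStartAt (pvAln l)) = [] := by
        apply pv_filter_none; intro p hp1 hp2
        have hr := pv_run (fun c => !PySem.Chars.isalnum c) l i p hp1 (by omega)
        unfold pvStartAt
        rw [pvAln_getD_lt l p hr.1]
        have := hr.2
        simp at this
        simp [this]
      have hends : (List.range' (i + 1) (l.length - i)).filter (pvEndAt (pvAln l)) = [] := by
        apply pv_filter_none; intro e he1 he2
        have hr := pv_run (fun c => !PySem.Chars.isalnum c) l i (e - 1) (by omega) (by omega)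
        unfold pvEndAt
        rw [pvAln_getD_lt l (e - 1) hr.1]
        have := hr.2
        simp at this
        simp [this]
      rw [hstarts, hends]
      simp
    · replace hc : pvSkip l l.length i < l.length := by omega
      have hjge : i ≤ pvSkip l l.length i := pvSkip_ge l l.length i
      have halj := pvSkip_stop l l.length i hc
      have hkchar := pvConsume_char l (pvSkip l l.length i)
      have hjk := pvConsume_gt l l.length (pvSkip l l.length i) hc halj
      have htle : ((l.drop (pvSkip l l.length i)).takeWhile
          (fun c => PySem.Chars.isalnum c)).length ≤ l.length - pvSkip l l.length i := by
        have := (List.takeWhile_prefix (fun c => PySem.Chars.isalnum c)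
          (l := l.drop (pvSkip l l.length i))).length_le
        simpa [List.length_drop] using this
      have hkle : pvConsume l l.length (pvSkip l l.length i) ≤ l.length := by omega
      have hkstop : pvConsume l l.length (pvSkip l l.length i) = l.length ∨
          PySem.Chars.isalnum (l.getD (pvConsume l l.length (pvSkip l l.length i)) ' ') = false := by
        rcases Nat.lt_or_ge (pvConsume l l.length (pvSkip l l.length i)) l.length with h | h
        · exact Or.inr (pvConsume_stop l l.length (pvSkip l l.length i) h)
        · exact Or.inl (by omega)
      have Hi' : i = 0 ∨ PySem.Chars.isalnum (l.getD i ' ') = false := by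
        rcases Hi with h | h | h
        · exact Or.inl h
        · omega
        · exact Or.inr h
      have R1 : ∀ p, i ≤ p → p < pvSkip l l.length i →
          PySem.Chars.isalnum (l.getD p ' ') = false := by
        intro p hp1 hp2
        have hr := pv_run (fun c => !PySem.Chars.isalnum c) l i p hp1 (by omega)
        have := hr.2
        simpa using this
      have R2 : ∀ p, pvSkip l l.length i ≤ p → p < pvConsume l l.length (pvSkip l l.length i) →
          PySem.Chars.isalnum (l.getD p ' ') = true := by
        intro p hp1 hp2
        have hr := pv_run (fun c => PySem.Chars.isalnum c) l (pvSkip l l.length i) p hp1 (by omega)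
        simpa using hr.2
      obtain ⟨hS, hE⟩ := pv_step l i (pvSkip l l.length i)
        (pvConsume l l.length (pvSkip l l.length i)) hjge hc hjk hkle Hi' R1 halj R2 hkstop
      rw [pvOuter, dif_neg (by omega)]
      rw [hS, hE, List.zip_cons_cons, List.map_cons]
      have hHk : pvConsume l l.length (pvSkip l l.length i) = 0 ∨
          pvConsume l l.length (pvSkip l l.length i) = l.length ∨
          PySem.Chars.isalnum (l.getD (pvConsume l l.length (pvSkip l l.length i)) ' ') = false := by
        rcases hkstop with h | h
        · exact Or.inr (Or.inl h)
        · exact Or.inr (Or.inr h)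
      exact congrArg (List.cons _)
        (ih l (pvConsume l l.length (pvSkip l l.length i)) hkle (by omega) hHk)

-- ===== VERDICT (by name: the statement is the Claim_ definition above) =====
theorem iter_words_py_spec : Claim_equal_iter_words_py := by
  intro line _
  unfold Spec_iter_words_py iter_words_py iter_words_py_alt
  have h := pv_main line.toList.length line.toList 0 (by omega) (by omega) (Or.inl rfl)
  simpa [List.range_eq_range', pvAln_length] using h
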